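-- pv_equiv track=rewrite | github.com/nahian-147/my_codes | pys/CF1607B.py | final_pos
-- ===== SOURCE A (Python) =====
-- def final_pos(x0,n):
--     pos = x0
--     d = 1
--     for _ in range(n):
--         if(pos % 2 == 0):
--             pos -= d
--         else:
--             pos += d
--         d += 1
--     return pos
-- ===== SOURCE B (Python) =====
-- def final_pos(x0, n):
--     if n <= 0:
--         return x0
--     r = n % 4
--     if r == 0:
--         off = 0
--     elif r == 1:
--         off = -n
--     elif r == 2:
--         off = 1
--     else:
--         off = n + 1
--     return x0 + off if x0 % 2 == 0 else x0 - off
-- ===== Notes on version B (the rewrite author's own statement) =====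
-- stated objective: faster
-- what changed: Replaced the n-step jump simulation by a closed-form formula based on the period-4 pattern of the offsets, selected by n % 4 and the parity of x0.
import Mathlib
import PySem

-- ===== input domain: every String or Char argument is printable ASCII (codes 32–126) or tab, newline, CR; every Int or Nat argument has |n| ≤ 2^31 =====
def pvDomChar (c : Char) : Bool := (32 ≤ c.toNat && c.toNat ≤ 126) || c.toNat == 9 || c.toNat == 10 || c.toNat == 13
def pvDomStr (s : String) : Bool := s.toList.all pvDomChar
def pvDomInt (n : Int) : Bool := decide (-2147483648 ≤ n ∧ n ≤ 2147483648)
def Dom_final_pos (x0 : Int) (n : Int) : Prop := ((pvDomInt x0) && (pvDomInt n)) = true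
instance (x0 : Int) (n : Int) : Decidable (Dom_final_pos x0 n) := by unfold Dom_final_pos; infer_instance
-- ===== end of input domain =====

-- ===== PORT A =====
-- A simulates n alternating-direction jumps; B computes the closed form from the period-4 offset pattern (O(1) vs O(n)).
def final_pos (x0 : Int) (n : Int) : Int :=
  ((PySem.List.pyRange 0 n 1).foldl
    (fun (st : Int × Int) _ =>
      if PySem.Int.mod st.1 2 = 0 then (st.1 - st.2, st.2 + 1) else (st.1 + st.2, st.2 + 1))
    (x0, 1)).1

-- ===== PORT B =====
def final_pos_alt (x0 : Int) (n : Int) : Int :=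
  if n ≤ 0 then x0
  else
    let r := PySem.Int.mod n 4
    let off : Int := if r = 0 then 0 else if r = 1 then -n else if r = 2 then 1 else n + 1
    if PySem.Int.mod x0 2 = 0 then x0 + off else x0 - off

-- ===== PRECONDITION & SPEC =====
def Spec_final_pos (x0 : Int) (n : Int) (out : Int) : Prop := out = final_pos_alt x0 n
instance (x0 : Int) (n : Int) (out : Int) : Decidable (Spec_final_pos x0 n out) := by unfold Spec_final_pos; infer_instance

-- ===== CLAIM (what is proved, stated in full; the proofs are below) =====
def Claim_equal_final_pos : Prop := ∀ (x0 : Int) (n : Int), Dom_final_pos x0 n → Spec_final_pos x0 n (final_pos x0 n)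

-- ===== LEMMAS AND PROOFS =====

-- A's loop body as a state transition on (pos, d)
def pvStep (st : Int × Int) : Int × Int :=
  if PySem.Int.mod st.1 2 = 0 then (st.1 - st.2, st.2 + 1) else (st.1 + st.2, st.2 + 1)

-- k iterations of A's loop from the initial state
def pvLoop (x0 : Int) : Nat → Int × Int
  | 0 => (x0, 1)
  | k + 1 => pvStep (pvLoop x0 k)

-- closed-form offset after k steps (for even x0; negated for odd x0)
def pvOff (k : Nat) : Int :=
  if k % 4 = 0 then 0 else if k % 4 = 1 then -(k : Int) else if k % 4 = 2 then 1 else (k : Int) + 1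

def pvG (x0 : Int) (k : Nat) : Int :=
  if PySem.Int.mod x0 2 = 0 then x0 + pvOff k else x0 - pvOff k

theorem pvFold_eq_loop (x0 : Int) (k : Nat) :
    ((PySem.List.pyRange 0 (k : Int) 1).foldl (fun st _ => pvStep st) (x0, 1)) = pvLoop x0 k := by
  induction k with
  | zero => simp [PySem.List.pyRange_one_eq_nil, pvLoop]
  | succ k ih =>
    have h : PySem.List.pyRange 0 ((k : Int) + 1) 1
        = PySem.List.pyRange 0 (k : Int) 1 ++ [(k : Int)] :=
      PySem.List.pyRange_one_succ_right (by positivity)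
    push_cast
    rw [h, List.foldl_append, ih]
    simp [pvLoop]

theorem pvLoop_eq (x0 : Int) (k : Nat) : pvLoop x0 k = (pvG x0 k, (k : Int) + 1) := by
  induction k with
  | zero => simp [pvLoop, pvG, pvOff]
  | succ k ih =>
    rw [pvLoop, ih, pvStep]
    have hmod : ∀ a : Int, PySem.Int.mod a 2 = a % 2 :=
      fun a => PySem.Int.mod_eq_emod_of_pos (by norm_num)
    simp only [pvG, pvOff, hmod]
    split_ifs <;> (rw [Prod.mk.injEq]; push_cast at *; exact ⟨by omega, by omega⟩)

-- ===== VERDICT (by name: the statement is the Claim_ definition above) =====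
theorem final_pos_spec : Claim_equal_final_pos := by
  intro x0 n _
  unfold Spec_final_pos final_pos final_pos_alt
  by_cases hn : n ≤ 0
  · rw [PySem.List.pyRange_one_eq_nil (by omega)]
    simp [hn]
  · have hk : n = ((n.toNat : Nat) : Int) := by omega
    rw [hk]
    have hfold := pvFold_eq_loop x0 n.toNat
    simp only [pvStep] at hfold
    rw [hfold, pvLoop_eq]
    have hmod2 : ∀ a : Int, PySem.Int.mod a 2 = a % 2 :=
      fun a => PySem.Int.mod_eq_emod_of_pos (by norm_num)
    have hmod4 : ∀ a : Int, PySem.Int.mod a 4 = a % 4 :=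
      fun a => PySem.Int.mod_eq_emod_of_pos (by norm_num)
    simp only [pvG, pvOff, hmod2, hmod4,
      if_neg (show ¬ ((n.toNat : Nat) : Int) ≤ 0 by omega)]
    split_ifs <;> push_cast at * <;> omega
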